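-- pv_equiv track=rewrite | github.com/evanvasey/proj_spin_coupled_ox | bond_breaking_class/rdm.py | find_orbitals_differences
-- ===== SOURCE A (Python) =====
-- def find_orbitals_differences(bra,ket):
--     differences_index = []
--     same_orbital_index = []
--     counter = 0
--     for index,(occ_bra,occ_ket) in enumerate(zip(bra[1:],ket[1:])):
--         if occ_bra != occ_ket:
--             if occ_ket:
--                 differences_index.append(index)
--             else:
--                 differences_index.insert(counter,index)
--                 counter += 1
--         else:
--             if occ_bra == 1:
--                 same_orbital_index.append(index)
--
--     return len(differences_index),differences_index,same_orbital_index
-- ===== SOURCE B (Python) =====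
-- def find_orbitals_differences(bra, ket):
--     pairs = list(enumerate(zip(bra[1:], ket[1:])))
--     front = [i for i, (b, k) in pairs if b != k and not k]
--     back = [i for i, (b, k) in pairs if b != k and k]
--     same_orbital_index = [i for i, (b, k) in pairs if b == k and b == 1]
--     differences_index = front + back
--     return len(differences_index), differences_index, same_orbital_index
-- ===== Notes on version B (the rewrite author's own statement) =====
-- stated objective: alternative
-- what changed: A maintains one differences list in a single stateful loop, list.insert()-ing ket-empty indices at a moving counter; B instead builds the ket-empty front list, the ket-occupied back list and the shared-orbital list by three plain filtering comprehensions and concatenates front+back once.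
import Mathlib
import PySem

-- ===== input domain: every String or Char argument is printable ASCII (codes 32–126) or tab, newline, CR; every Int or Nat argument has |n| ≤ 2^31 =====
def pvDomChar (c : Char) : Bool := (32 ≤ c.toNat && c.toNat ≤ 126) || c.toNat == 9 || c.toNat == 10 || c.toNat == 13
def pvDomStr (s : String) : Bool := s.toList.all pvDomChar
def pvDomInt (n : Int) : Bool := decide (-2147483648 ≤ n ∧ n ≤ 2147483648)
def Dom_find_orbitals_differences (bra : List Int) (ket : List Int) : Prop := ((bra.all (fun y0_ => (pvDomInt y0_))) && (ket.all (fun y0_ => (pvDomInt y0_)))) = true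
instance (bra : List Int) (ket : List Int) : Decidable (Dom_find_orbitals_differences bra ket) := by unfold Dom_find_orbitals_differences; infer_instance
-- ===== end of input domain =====

-- B replaces A's moving-counter list.insert bookkeeping by two filtered index
-- lists concatenated once (front = ket-empty diffs, back = ket-occupied diffs); alternative decomposition.

-- ===== PORT A =====
-- the loop body of A, as a named helper (state: differences, same, counter)
def pvAStep (st : List Int × List Int × Int) (p : Int × Int × Int) : List Int × List Int × Int :=
  let (d, s, c) := st
  let (i, ob, ok) := p
  if ob ≠ ok then
    if ok ≠ 0 then (d ++ [i], s, c)
    else (PySem.List.insert d c i, s, c + 1)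
  else if ob = 1 then (d, s ++ [i], c)
  else (d, s, c)

def find_orbitals_differences (bra : List Int) (ket : List Int) : Int × List Int × List Int :=
  -- bra[1:] / ket[1:] on lists with step 1 are exactly List.drop 1
  let pairs := PySem.List.enumerate (List.zip (bra.drop 1) (ket.drop 1))
  let st := pairs.foldl pvAStep ([], [], 0)
  ((st.1.length : Int), st.1, st.2.1)

-- ===== PORT B =====
def pvCondFront (p : Int × Int × Int) : Bool := (!(p.2.1 == p.2.2)) && (p.2.2 == 0)
def pvCondBack (p : Int × Int × Int) : Bool := (!(p.2.1 == p.2.2)) && (!(p.2.2 == 0))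
def pvCondSame (p : Int × Int × Int) : Bool := (p.2.1 == p.2.2) && (p.2.1 == 1)

def find_orbitals_differences_alt (bra : List Int) (ket : List Int) : Int × List Int × List Int :=
  let pairs := PySem.List.enumerate (List.zip (bra.drop 1) (ket.drop 1))
  let front := (pairs.filter pvCondFront).map (·.1)
  let back := (pairs.filter pvCondBack).map (·.1)
  let same := (pairs.filter pvCondSame).map (·.1)
  let diffs := front ++ back
  ((diffs.length : Int), diffs, same)

-- ===== PRECONDITION & SPEC =====
def Spec_find_orbitals_differences (bra : List Int) (ket : List Int) (out : Int × List Int × List Int) : Prop := out = find_orbitals_differences_alt bra ket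
instance (bra : List Int) (ket : List Int) (out : Int × List Int × List Int) : Decidable (Spec_find_orbitals_differences bra ket out) := by unfold Spec_find_orbitals_differences; infer_instance

-- ===== CLAIM (what is proved, stated in full; the proofs are below) =====
def Claim_equal_find_orbitals_differences : Prop := ∀ (bra : List Int) (ket : List Int), Dom_find_orbitals_differences bra ket → Spec_find_orbitals_differences bra ket (find_orbitals_differences bra ket)

-- ===== LEMMAS AND PROOFS =====
-- loop invariant: the fold over l starting from (front ++ back, same, |front|)
-- yields front/back grown by the filtered indices, with the counter tracking |front|
theorem pvLoopInv (l : List (Int × Int × Int)) (front back same : List Int) :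
    l.foldl pvAStep (front ++ back, same, (front.length : Int)) =
      ((front ++ (l.filter pvCondFront).map (·.1)) ++ (back ++ (l.filter pvCondBack).map (·.1)),
       same ++ (l.filter pvCondSame).map (·.1),
       (front.length : Int) + ((l.filter pvCondFront).length : Int)) := by
  induction l generalizing front back same with
  | nil => simp
  | cons p t ih =>
    obtain ⟨i, ob, ok⟩ := p
    by_cases h1 : ob = ok
    · subst h1
      by_cases h2 : ob = 1
      · subst h2
        have hstep : pvAStep (front ++ back, same, (front.length : Int)) (i, 1, 1)
            = (front ++ back, same ++ [i], (front.length : Int)) := by simp [pvAStep]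
        rw [List.foldl_cons, hstep, ih front back (same ++ [i])]
        simp [pvCondFront, pvCondBack, pvCondSame]
      · have hstep : pvAStep (front ++ back, same, (front.length : Int)) (i, ob, ob)
            = (front ++ back, same, (front.length : Int)) := by simp [pvAStep, h2]
        rw [List.foldl_cons, hstep, ih front back same]
        simp [pvCondFront, pvCondBack, pvCondSame, h2]
    · by_cases h2 : ok = 0
      · subst h2
        have hstep : pvAStep (front ++ back, same, (front.length : Int)) (i, ob, 0)
            = ((front ++ [i]) ++ back, same, ((front ++ [i]).length : Int)) := by
          have hins : PySem.List.insert (front ++ back) ((front.length : Nat) : Int) i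
              = (front ++ [i]) ++ back := by
            rw [PySem.List.insert_natCast _ _ _ (by simp)]
            simp
          simp [pvAStep, h1, hins]
        rw [List.foldl_cons, hstep, ih (front ++ [i]) back same]
        simp [pvCondFront, pvCondBack, pvCondSame, h1]
        ring
      · have hstep : pvAStep (front ++ back, same, (front.length : Int)) (i, ob, ok)
            = (front ++ (back ++ [i]), same, (front.length : Int)) := by
          simp [pvAStep, h1, h2]
        rw [List.foldl_cons, hstep, ih front (back ++ [i]) same]
        simp [pvCondFront, pvCondBack, pvCondSame, h1, h2]

-- ===== VERDICT (by name: the statement is the Claim_ definition above) =====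
theorem find_orbitals_differences_spec : Claim_equal_find_orbitals_differences := by
  intro bra ket _
  unfold Spec_find_orbitals_differences find_orbitals_differences find_orbitals_differences_alt
  have := pvLoopInv (PySem.List.enumerate (List.zip (bra.drop 1) (ket.drop 1))) [] [] []
  simp at this
  simp [this]
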